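-- pv_equiv track=rewrite | github.com/jack-chaudier/stark | scripts/runtime_collapse_boundary.py | exhaustive_exact_basis_small
-- ===== SOURCE A (Python) =====
-- from itertools import combinations, permutations, product
-- from typing import DefaultDict, Dict, Iterable, List, Sequence, Tuple
--
-- Family = Tuple[Tuple[int, ...], ...]
--
-- def tuple_to_mask(items: Iterable[int]) -> int:
--     mask = 0
--     for item in items:
--         mask |= 1 << (item - 1)
--     return mask
--
-- def all_subset_masks(p: int, min_size: int = 0, max_size: int | None = None) -> Tuple[int, ...]:
--     masks: List[int] = []
--     max_rank = p if max_size is None else max_size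
--     for size in range(min_size, max_rank + 1):
--         for subset in combinations(range(1, p + 1), size):
--             masks.append(tuple_to_mask(subset))
--     return tuple(masks)
--
-- def family_union(family: Family) -> Tuple[int, ...]:
--     if not family:
--         return ()
--     return tuple(sorted(set().union(*map(set, family))))
--
-- def restrict_family_mask(family: Family, survivor_mask: int) -> Family:
--     return tuple(
--         edge
--         for edge in family
--         if tuple_to_mask(edge) & survivor_mask == tuple_to_mask(edge)
--     )
--
-- def family_variable_union(family: Family) -> Tuple[int, ...]:
--     return family_union(family)
--
-- def contract_projection_signature(family: Family, probe_masks: Sequence[int], projection: str, p: int) -> Tuple[object, ...]: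
--     signature: List[object] = []
--     for probe_mask in probe_masks:
--         restricted = restrict_family_mask(family, probe_mask)
--         if projection == "answer":
--             signature.append("feasible" if restricted else "blocked")
--         elif projection == "variable":
--             signature.append(family_variable_union(restricted))
--         elif projection == "family":
--             signature.append(restricted)
--         else:
--             raise ValueError(f"unknown projection: {projection}")
--     return tuple(signature)
--
-- def exhaustive_exact_basis_small(
--     families: Sequence[Family],
--     projection: str,
--     p: int,
-- ) -> Tuple[int, Tuple[int, ...]]:
--     probe_masks = all_subset_masks(p)
--     columns = [
--         tuple(
--             contract_projection_signature(family, [probe_mask], projection, p)[0]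
--             for family in families
--         )
--         for probe_mask in probe_masks
--     ]
--     if len(families) <= 1:
--         return 0, ()
--     for size in range(len(probe_masks) + 1):
--         for subset in combinations(range(len(probe_masks)), size):
--             if not subset:
--                 continue
--             signatures = set(zip(*[columns[index] for index in subset]))
--             if len(signatures) == len(families):
--                 return size, tuple(probe_masks[index] for index in subset)
--     raise RuntimeError("no exact probe basis found")
-- ===== SOURCE B (Python) =====
-- from typing import Iterable, Sequence, Tuple
--
-- Family = Tuple[Tuple[int, ...], ...]
--
--
-- def _mask(items: Iterable[int]) -> int:
--     mask = 0
--     for item in items: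
--         mask |= 1 << (item - 1)
--     return mask
--
--
-- def _combos(lo: int, hi: int, size: int):
--     """All sorted size-subsets of range(lo, hi), in lexicographic order."""
--     if size == 0:
--         return [[]]
--     out = []
--     for v in range(lo, hi - size + 1):
--         for rest in _combos(v + 1, hi, size - 1):
--             out.append([v] + rest)
--     return out
--
--
-- def _pair_diff_mask(pre_i, pre_j, probe_masks, projection: str) -> int:
--     """Bitmask over probe indices at which the two families' projections differ."""
--     dm = 0
--     for k, m in enumerate(probe_masks):
--         ri = [e for e, em in pre_i if em & m == em]
--         rj = [e for e, em in pre_j if em & m == em]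
--         if projection == "answer":
--             differ = bool(ri) != bool(rj)
--         elif projection == "variable":
--             differ = sorted({v for e in ri for v in e}) != sorted({v for e in rj for v in e})
--         elif projection == "family":
--             differ = ri != rj
--         else:
--             raise ValueError(f"unknown projection: {projection}")
--         if differ:
--             dm |= 1 << k
--     return dm
--
--
-- def exhaustive_exact_basis_small(
--     families: Sequence[Family],
--     projection: str,
--     p: int,
-- ) -> Tuple[int, Tuple[int, ...]]:
--     probe_masks = [
--         _mask(sub) for size in range(0, p + 1) for sub in _combos(1, p + 1, size)
--     ]
--     n = len(families)
--     if n <= 1: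
--         return 0, ()
--     pre = [[(tuple(e), _mask(e)) for e in fam] for fam in families]
--     diffs = [
--         _pair_diff_mask(pre[i], pre[j], probe_masks, projection)
--         for i in range(n)
--         for j in range(i + 1, n)
--     ]
--     K = len(probe_masks)
--     for size in range(1, K + 1):
--         for subset in _combos(0, K, size):
--             chosen = 0
--             for k in subset:
--                 chosen |= 1 << k
--             if all(dm & chosen for dm in diffs):
--                 return size, tuple(probe_masks[k] for k in subset)
--     raise RuntimeError("no exact probe basis found")
-- ===== Notes on version B (the rewrite author's own statement) =====
-- stated objective: alternative
-- what changed: B precomputes a pairwise distinguishing table as bitmasks over probe indices (one integer per family pair) and, using its own recursive lexicographic subset generator, accepts the first subset whose chosen-index bitmask intersects every pair's mask, instead of A's itertools enumeration that rebuilds and counts a zipped signature set for every candidate subset.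
import Mathlib
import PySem

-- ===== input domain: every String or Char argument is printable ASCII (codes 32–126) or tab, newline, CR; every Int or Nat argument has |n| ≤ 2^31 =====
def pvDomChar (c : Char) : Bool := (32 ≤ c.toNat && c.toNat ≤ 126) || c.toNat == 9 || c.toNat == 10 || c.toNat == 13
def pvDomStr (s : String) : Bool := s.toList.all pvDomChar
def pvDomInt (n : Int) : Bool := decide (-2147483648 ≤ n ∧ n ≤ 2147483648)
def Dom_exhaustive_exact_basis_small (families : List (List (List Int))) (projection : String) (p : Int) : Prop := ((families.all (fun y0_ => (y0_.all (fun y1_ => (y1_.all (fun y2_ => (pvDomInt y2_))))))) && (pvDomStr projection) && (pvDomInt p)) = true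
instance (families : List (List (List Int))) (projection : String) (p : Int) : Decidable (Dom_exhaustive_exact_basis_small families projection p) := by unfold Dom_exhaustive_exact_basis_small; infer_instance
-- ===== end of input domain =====

-- B replaces A's per-subset rebuild of a zipped signature set by a precomputed pairwise
-- distinguishing table of probe-index bitmasks plus a bitmask-intersection test, over its own
-- recursive lexicographic subset generator (objective: alternative decomposition; same cost class).

-- tuple_to_mask (A) = _mask (B): the two Pythons contain this identical helper, shared here.
-- (i - 1).toNat is exact for i ≥ 1; Python raises ValueError on i ≤ 0 (excluded by Pre_)
def pvMask (edge : List Int) : Int :=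
  edge.foldl (fun m i => PySem.Int.bor m ((1 : Int) <<< (i - 1).toNat)) 0

-- ===== PORT A =====
-- A projection value ("feasible"/"blocked" string, variable tuple, or restricted family):
-- only ever compared for equality, so "feasible"/"blocked" is encoded as a Bool (exact).
inductive PVal where
  | ans : Bool → PVal
  | var : List Int → PVal
  | fam : List (List Int) → PVal
  | err : PVal
deriving DecidableEq, Repr

-- itertools.combinations(l, k) in lexicographic order
def pvCombos {α : Type} : Nat → List α → List (List α)
  | 0, _ => [[]]
  | _ + 1, [] => []
  | k + 1, x :: xs => (pvCombos k xs).map (x :: ·) ++ pvCombos (k + 1) xs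

-- all_subset_masks(p)
def pvMasks (p : Int) : List Int :=
  (PySem.List.pyRange 0 (p + 1) 1).flatMap
    (fun size => (pvCombos size.toNat (PySem.List.pyRange 1 (p + 1) 1)).map pvMask)

-- restrict_family_mask + the projection dispatch of contract_projection_signature;
-- PVal.err stands for the ValueError branch (excluded by Pre_)
def pvSig (family : List (List Int)) (m : Int) (projection : String) : PVal :=
  let r := family.filter (fun e => PySem.Int.band (pvMask e) m == pvMask e)
  if projection == "answer" then PVal.ans (!r.isEmpty)
  else if projection == "variable" then
    PVal.var (if r.isEmpty then [] else PySem.List.sorted (PySem.Set.ofList r.flatten) (fun x => x) false)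
  else if projection == "family" then PVal.fam r
  else PVal.err

-- columns[k][j] (always in range where used)
def pvColAt (columns : List (List PVal)) (k j : Nat) : PVal := (columns.getD k []).getD j PVal.err

-- A's inner loop over combinations of one size: first nonempty index subset whose zipped
-- signature set has one signature per family
def pvScanA (columns : List (List PVal)) (n : Nat) : List (List Nat) → Option (List Nat)
  | [] => none
  | s :: rest =>
    if s.isEmpty then pvScanA columns n rest
    else if (PySem.Set.ofList ((List.range n).map (fun j => s.map (fun i => pvColAt columns i j)))).length == n
    then some s
    else pvScanA columns n rest

-- A's outer loop over sizes
def pvFindA (columns : List (List PVal)) (n : Nat) (idxs : List Nat) : List Nat → Option (List Nat)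
  | [] => none
  | size :: sizes =>
    match pvScanA columns n (pvCombos size idxs) with
    | some s => some s
    | none => pvFindA columns n idxs sizes

def exhaustive_exact_basis_small (families : List (List (List Int))) (projection : String) (p : Int) : Int × List Int :=
  let probe_masks := pvMasks p
  let columns := probe_masks.map (fun m => families.map (fun fam => pvSig fam m projection))
  if families.length ≤ 1 then (0, [])
  else
    match pvFindA columns families.length (List.range probe_masks.length)
        (List.range (probe_masks.length + 1)) with
    | some s => ((s.length : Int), s.map (fun i => probe_masks.getD i 0))
    | none => (-1, [])  -- Python: raise RuntimeError("no exact probe basis found"); excluded by Pre_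

-- ===== PORT B =====
-- B's recursive lexicographic combination engine _combos(lo, hi, size):
-- all sorted size-subsets of range(lo, hi); range(lo, hi - size + 1) with size = s+1 is
-- pyRange lo (hi - s) 1
def pvCombosB : Nat → Int → Int → List (List Int)
  | 0, _, _ => [[]]
  | s + 1, lo, hi =>
    (PySem.List.pyRange lo (hi - s) 1).flatMap
      (fun v => (pvCombosB s (v + 1) hi).map (v :: ·))

-- _pair_diff_mask: bitmask over probe indices at which the two families' projections differ
def pvDiffMask (prei prej : List (List Int × Int)) (probe_masks : List Int) (projection : String) : Int :=
  (PySem.List.enumerate probe_masks).foldl (fun dm km =>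
    let ri := (prei.filter (fun q => PySem.Int.band q.2 km.2 == q.2)).map Prod.fst
    let rj := (prej.filter (fun q => PySem.Int.band q.2 km.2 == q.2)).map Prod.fst
    let differ :=
      if projection == "answer" then (!ri.isEmpty) != (!rj.isEmpty)
      else if projection == "variable" then
        PySem.List.sorted (PySem.Set.ofList ri.flatten) (fun x => x) false
          != PySem.List.sorted (PySem.Set.ofList rj.flatten) (fun x => x) false
      else if projection == "family" then ri != rj
      else false  -- Python: raise ValueError (unknown projection); excluded by Pre_
    if differ then PySem.Int.bor dm ((1 : Int) <<< km.1.toNat) else dm) 0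

-- B's inner loop: first subset whose chosen-index bitmask meets every pair's diff mask
def pvHitB (diffs : List Int) : List (List Int) → Option (List Int)
  | [] => none
  | s :: rest =>
    let chosen := s.foldl (fun c k => PySem.Int.bor c ((1 : Int) <<< k.toNat)) 0
    if diffs.all (fun dm => PySem.Int.band dm chosen != 0) then some s
    else pvHitB diffs rest

-- B's outer loop over sizes 1..K
def pvSizesB (diffs : List Int) (K : Int) : List Int → Option (List Int)
  | [] => none
  | size :: sizes =>
    match pvHitB diffs (pvCombosB size.toNat 0 K) with
    | some s => some s
    | none => pvSizesB diffs K sizes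

def exhaustive_exact_basis_small_alt (families : List (List (List Int))) (projection : String) (p : Int) : Int × List Int :=
  let probe_masks := (PySem.List.pyRange 0 (p + 1) 1).flatMap
      (fun size => (pvCombosB size.toNat 1 (p + 1)).map pvMask)
  let n := families.length
  if n ≤ 1 then (0, [])
  else
    let pre := families.map (fun fam => fam.map (fun e => (e, pvMask e)))
    -- 'for i in range(n) for j in range(i+1, n)': range(i+1, n) is range' (i+1) (n-(i+1))
    let diffs := (List.range n).flatMap (fun i =>
      (List.range' (i + 1) (n - (i + 1))).map (fun j =>
        pvDiffMask (pre.getD i []) (pre.getD j []) probe_masks projection))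
    let K := probe_masks.length
    match pvSizesB diffs (K : Int) (PySem.List.pyRange 1 ((K : Int) + 1) 1) with
    | some s => ((s.length : Int), s.map (fun k => probe_masks.getD k.toNat 0))
    | none => (-1, [])  -- Python: raise RuntimeError("no exact probe basis found"); excluded by Pre_

-- ===== PRECONDITION & SPEC =====
-- Pre_-only helpers (closed-form reading, independent of the ports): an edge survives a probe
-- set S of variables iff all its variables lie in S ∩ {1..p}; two families are separated by S
-- iff the surviving edges differ in what the projection observes.
def pvRestrS (p : Int) (S : List Int) (f : List (List Int)) : List (List Int) :=
  f.filter (fun e => e.all (fun v => decide (v ∈ S) && decide (1 ≤ v) && decide (v ≤ p)))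

def pvSepS (p : Int) (projection : String) (S : List Int) (f g : List (List Int)) : Bool :=
  if projection = "answer" then (pvRestrS p S f).isEmpty != (pvRestrS p S g).isEmpty
  else if projection = "variable" then
    PySem.List.sorted (PySem.Set.ofList (pvRestrS p S f).flatten) (fun x => x) false
      != PySem.List.sorted (PySem.Set.ofList (pvRestrS p S g).flatten) (fun x => x) false
  else pvRestrS p S f != pvRestrS p S g

-- Pre_ excludes exactly the inputs on which A raises: ValueError for an unknown projection
-- string or an edge variable < 1 (both reached iff families is nonempty and 0 ≤ p), and
-- RuntimeError when no probe basis exists (≥ 2 families with p < 0, or some pair of families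
-- that no probe set distinguishes — it suffices to test variable sets drawn from the pair's
-- own edges, since a probe's effect is determined by which edges survive it).
def Pre_exhaustive_exact_basis_small (families : List (List (List Int))) (projection : String) (p : Int) : Prop :=
  (families ≠ [] → 0 ≤ p → projection = "answer" ∨ projection = "variable" ∨ projection = "family") ∧
  (families ≠ [] → 0 ≤ p → ∀ fam ∈ families, ∀ e ∈ fam, ∀ v ∈ e, 1 ≤ v) ∧
  (2 ≤ families.length →
    0 ≤ p ∧ List.Pairwise
      (fun f g => ∃ E ∈ (f ++ g).sublists, pvSepS p projection E.flatten f g = true) families)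

instance (families : List (List (List Int))) (projection : String) (p : Int) : Decidable (Pre_exhaustive_exact_basis_small families projection p) := by unfold Pre_exhaustive_exact_basis_small; infer_instance

def pvWitness_exhaustive_exact_basis_small : List (List (List Int)) × String × Int := ([[[1]], []], "answer", 1)

def Spec_exhaustive_exact_basis_small (families : List (List (List Int))) (projection : String) (p : Int) (out : Int × List Int) : Prop := out = exhaustive_exact_basis_small_alt families projection p
instance (families : List (List (List Int))) (projection : String) (p : Int) (out : Int × List Int) : Decidable (Spec_exhaustive_exact_basis_small families projection p out) := by unfold Spec_exhaustive_exact_basis_small; infer_instance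

-- ===== CLAIM (what is proved, stated in full; the proofs are below) =====
def Claim_equal_exhaustive_exact_basis_small : Prop := ∀ (families : List (List (List Int))) (projection : String) (p : Int), Dom_exhaustive_exact_basis_small families projection p → Pre_exhaustive_exact_basis_small families projection p → Spec_exhaustive_exact_basis_small families projection p (exhaustive_exact_basis_small families projection p)



-- ===== LEMMAS AND PROOFS =====

-- combinations of a mapped list
theorem pvCombos_map {α β : Type} (f : α → β) : ∀ (k : Nat) (l : List α),
    pvCombos k (l.map f) = (pvCombos k l).map (List.map f) := by
  intro k l
  induction l generalizing k with
  | nil => cases k <;> simp [pvCombos]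
  | cons x xs ih =>
    cases k with
    | zero => simp [pvCombos]
    | succ k => simp [pvCombos, ih, List.map_map, Function.comp]

theorem pvCombos_eq_nil {α : Type} : ∀ (k : Nat) (l : List α), l.length < k → pvCombos k l = [] := by
  intro k l
  induction l generalizing k with
  | nil => intro h; cases k with
    | zero => omega
    | succ k => rfl
  | cons x xs ih =>
    intro h
    cases k with
    | zero => omega
    | succ k =>
      simp only [pvCombos]
      rw [ih k (by simpa using h), ih (k + 1) (by simp at h ⊢; omega)]
      rfl

theorem pvCombos_length_mem {α : Type} : ∀ (k : Nat) (l : List α) (s : List α),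
    s ∈ pvCombos k l → s.length = k := by
  intro k l
  induction l generalizing k with
  | nil => intro s hs; cases k with
    | zero => simp [pvCombos] at hs; simp [hs]
    | succ k => simp [pvCombos] at hs
  | cons x xs ih =>
    intro s hs
    cases k with
    | zero => simp [pvCombos] at hs; simp [hs]
    | succ k =>
      simp only [pvCombos, List.mem_append, List.mem_map] at hs
      rcases hs with ⟨t, ht, rfl⟩ | hs
      · simp [ih k t ht]
      · exact ih (k + 1) s hs

-- unrolling pvCombos (s+1) over an integer range, B's way
theorem pvCombos_pyRange_unroll (s : Nat) : ∀ (n : Nat) (lo hi : Int), (hi - lo).toNat ≤ n →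
    pvCombos (s + 1) (PySem.List.pyRange lo hi 1)
      = (PySem.List.pyRange lo (hi - s) 1).flatMap
          (fun v => (pvCombos s (PySem.List.pyRange (v + 1) hi 1)).map (v :: ·)) := by
  intro n
  induction n with
  | zero =>
    intro lo hi h
    rw [PySem.List.pyRange_one_eq_nil (by omega), PySem.List.pyRange_one_eq_nil (by omega)]
    rfl
  | succ n ihn =>
    intro lo hi h
    by_cases hlt : lo < hi - s
    · rw [PySem.List.pyRange_one_cons (a := lo) (b := hi) (by omega),
        PySem.List.pyRange_one_cons (a := lo) (b := hi - s) hlt]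
      simp only [pvCombos, List.flatMap_cons]
      rw [ihn (lo + 1) hi (by omega)]
    · rw [PySem.List.pyRange_one_eq_nil (a := lo) (b := hi - s) (by omega)]
      rw [pvCombos_eq_nil (s + 1) _ (by rw [PySem.List.length_pyRange_one]; omega)]
      rfl

-- B's combination engine is A's combinations over the same range
theorem pvCombosB_eq : ∀ (s : Nat) (lo hi : Int),
    pvCombosB s lo hi = pvCombos s (PySem.List.pyRange lo hi 1) := by
  intro s
  induction s with
  | zero => intro lo hi; simp [pvCombosB, pvCombos]
  | succ s ihs =>
    intro lo hi
    simp only [pvCombosB, ihs]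
    exact (pvCombos_pyRange_unroll s (hi - lo).toNat lo hi le_rfl).symm

-- out-of-range probe index: both columns entries degenerate to PVal.err
theorem pvColAt_err {columns : List (List PVal)} {k j : Nat} (h : columns.length ≤ k) :
    pvColAt columns k j = PVal.err := by
  simp [pvColAt, List.getD, List.getElem?_eq_none h]

-- the deduplicated-set size of a list equals its length iff the list has no duplicates
theorem setOfList_length_eq_iff {α : Type} [BEq α] [LawfulBEq α] [DecidableEq α] (L : List α) :
    (PySem.Set.ofList (α := α) L).length = L.length ↔ L.Nodup := by
  have hcard : (PySem.Set.ofList (α := α) L).length = L.dedup.length := by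
    have h1 : (PySem.Set.ofList (α := α) L).dedup = PySem.Set.ofList (α := α) L :=
      List.dedup_eq_self.mpr (PySem.Set.nodup_ofList L)
    have h2 : (PySem.Set.ofList (α := α) L).toFinset = L.toFinset := by
      ext x; simp [PySem.Set.mem_ofList]
    have := List.card_toFinset (PySem.Set.ofList (α := α) L)
    rw [h1, h2, List.card_toFinset L] at this
    omega
  rw [hcard]
  constructor
  · intro h
    have := (List.dedup_sublist L).eq_of_length h
    exact List.dedup_eq_self.mp this
  · intro h
    rw [List.dedup_eq_self.mpr h]

-- A's acceptance test, read as a condition on family pairs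
theorem testA_iff (columns : List (List PVal)) (n : Nat) (t : List Nat) :
    (((PySem.Set.ofList ((List.range n).map (fun j => t.map (fun i => pvColAt columns i j)))).length == n) = true)
      ↔ (∀ i j : Nat, i < n → j < n → i < j →
          ∃ k ∈ t, k < columns.length ∧ pvColAt columns k i ≠ pvColAt columns k j) := by
  rw [beq_iff_eq]
  have hdiff : ∀ i j : Nat, (t.map (fun k => pvColAt columns k i) ≠ t.map (fun k => pvColAt columns k j))
      ↔ ∃ k ∈ t, k < columns.length ∧ pvColAt columns k i ≠ pvColAt columns k j := by
    intro i j
    constructor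
    · intro hne
      have h2 : ¬ ∀ k ∈ t, pvColAt columns k i = pvColAt columns k j :=
        fun hall => hne (List.map_inj_left.mpr hall)
      push Not at h2
      obtain ⟨k, hk, hne2⟩ := h2
      refine ⟨k, hk, ?_, hne2⟩
      by_contra hge
      exact hne2 (by rw [pvColAt_err (by omega), pvColAt_err (by omega)])
    · rintro ⟨k, hk, _, hne2⟩
      intro heq
      exact hne2 (List.map_inj_left.mp heq k hk)
  have hlen : ((List.range n).map (fun j => t.map (fun i => pvColAt columns i j))).length = n := by simp
  have hnodup := setOfList_length_eq_iff ((List.range n).map (fun j => t.map (fun i => pvColAt columns i j)))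
  rw [hlen] at hnodup
  rw [hnodup, List.Nodup, List.pairwise_map, List.pairwise_iff_getElem]
  simp only [List.getElem_range, List.length_range]
  constructor
  · intro h i j hi hj hij; exact (hdiff i j).mp (h i j hi hj hij)
  · intro h i j hi hj hij; exact (hdiff i j).mpr (h i j hi hj hij)

-- ===== bit-level reading of B's masks =====

theorem intShift_one (s : Nat) : ((1 : Int) <<< ((s : Nat) : Int)) = ((1 <<< s : Nat) : Int) := by
  have := Int.shiftLeft_natCast 1 s
  simpa using this

theorem oneShift_testBit (k j : Nat) : (1 <<< k).testBit j = (j == k) := by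
  rw [Bool.eq_iff_iff, Nat.shiftLeft_eq, one_mul, beq_iff_eq]
  constructor
  · intro h
    by_contra hne
    rw [Nat.testBit_two_pow_of_ne (Ne.symm hne)] at h
    exact absurd h (by simp)
  · rintro rfl
    exact Nat.testBit_two_pow_self

-- Nat-level readings of B's two bitmask folds (proof-only helpers)
def natOr (t : List Nat) (acc : Nat) : Nat := t.foldl (fun c k => c ||| (1 <<< k)) acc

def natDm (l : List (Int × Nat)) (g : Int → Bool) (acc : Nat) : Nat :=
  l.foldl (fun dm mk => if g mk.1 then dm ||| (1 <<< mk.2) else dm) acc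

theorem chosen_cast (t : List Nat) : ∀ (acc : Nat),
    ((t.map (fun k : Nat => (k : Int))).foldl
      (fun c k => PySem.Int.bor c ((1 : Int) <<< k.toNat)) ((acc : Nat) : Int))
      = ((natOr t acc : Nat) : Int) := by
  induction t with
  | nil => intro acc; simp [natOr]
  | cons x xs ih =>
    intro acc
    simp only [List.map_cons, List.foldl_cons, Int.toNat_natCast]
    rw [intShift_one, PySem.Int.bor_natCast]
    exact ih (acc ||| (1 <<< x))

theorem natOr_testBit (t : List Nat) : ∀ (acc j : Nat),
    (natOr t acc).testBit j = (acc.testBit j || t.contains j) := by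
  induction t with
  | nil => intro acc j; simp [natOr]
  | cons x xs ih =>
    intro acc j
    show (natOr xs (acc ||| 1 <<< x)).testBit j = _
    rw [ih, Nat.testBit_or, oneShift_testBit, Bool.eq_iff_iff]
    simp only [Bool.or_eq_true, beq_iff_eq, List.contains_iff_mem, List.mem_cons]
    tauto

theorem enumFold_cast (g : Int → Bool) : ∀ (probe : List Int) (s acc : Nat),
    ((PySem.List.enumerate probe ((s : Nat) : Int)).foldl
        (fun dm km => if g km.2 then PySem.Int.bor dm ((1 : Int) <<< km.1.toNat) else dm)
        ((acc : Nat) : Int))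
      = ((natDm (probe.zipIdx s) g acc : Nat) : Int) := by
  intro probe
  induction probe with
  | nil => intro s acc; simp [natDm, PySem.List.enumerate_nil]
  | cons x xs ih =>
    intro s acc
    rw [PySem.List.enumerate_cons]
    simp only [List.foldl_cons, List.zipIdx_cons, natDm, Int.toNat_natCast]
    have hinit : (if g x = true then PySem.Int.bor ((acc : Nat) : Int) ((1 : Int) <<< ((s : Nat) : Int))
        else ((acc : Nat) : Int))
        = (((if g x = true then acc ||| 1 <<< s else acc : Nat) : Nat) : Int) := by
      by_cases hg : g x
      · rw [if_pos hg, if_pos hg, intShift_one, PySem.Int.bor_natCast]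
      · rw [if_neg hg, if_neg hg]
    rw [hinit]
    have hs1 : ((s : Nat) : Int) + 1 = (((s + 1 : Nat) : Nat) : Int) := by push_cast; ring
    rw [hs1]
    rw [ih (s + 1) (if g x = true then acc ||| 1 <<< s else acc)]
    congr 1

theorem natDm_testBit (g : Int → Bool) : ∀ (l : List (Int × Nat)) (acc j : Nat),
    (natDm l g acc).testBit j = (acc.testBit j || l.any (fun mk => g mk.1 && mk.2 == j)) := by
  intro l
  induction l with
  | nil => intro acc j; simp [natDm]
  | cons x xs ih =>
    intro acc j
    simp only [natDm, List.foldl_cons, List.any_cons] at *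
    by_cases hg : g x.1
    · rw [if_pos hg, ih]
      rw [Bool.eq_iff_iff]
      simp only [Nat.testBit_or, oneShift_testBit, Bool.or_eq_true, beq_iff_eq, hg,
        Bool.and_eq_true, true_and]
      tauto
    · rw [if_neg hg, ih]
      simp [hg]

theorem zipIdx_any_iff (probe : List Int) (g : Int → Bool) (j : Nat) :
    ((probe.zipIdx 0).any (fun mk => g mk.1 && mk.2 == j) = true)
      ↔ ∃ (h : j < probe.length), g probe[j] = true := by
  have gen : ∀ (l : List Int) (s : Nat),
      ((l.zipIdx s).any (fun mk => g mk.1 && mk.2 == j) = true)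
        ↔ ∃ (i : Nat) (h : i < l.length), s + i = j ∧ g l[i] = true := by
    intro l
    induction l with
    | nil => intro s; simp
    | cons x xs ih =>
      intro s
      rw [List.zipIdx_cons, List.any_cons]
      simp only [Bool.or_eq_true, Bool.and_eq_true, beq_iff_eq, ih]
      constructor
      · rintro (⟨hg, rfl⟩ | ⟨i, hi, hsi, hgi⟩)
        · exact ⟨0, by simp, by simp, hg⟩
        · exact ⟨i + 1, by simp; omega, by omega, by simpa using hgi⟩
      · rintro ⟨i, hi, hsi, hgi⟩
        cases i with
        | zero => left; exact ⟨by simpa using hgi, by omega⟩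
        | succ i => right; exact ⟨i, by simp at hi; omega, by omega, by simpa using hgi⟩
  rw [gen probe 0]
  constructor
  · rintro ⟨i, hi, hij, hg⟩
    have hij' : i = j := by omega
    subst hij'
    exact ⟨hi, hg⟩
  · rintro ⟨h, hg⟩
    exact ⟨j, h, by omega, hg⟩

theorem and_ne_zero_iff (a b : Nat) :
    a &&& b ≠ 0 ↔ ∃ j, a.testBit j = true ∧ b.testBit j = true := by
  constructor
  · intro h
    by_contra hc
    push Not at hc
    apply h
    apply Nat.zero_of_testBit_eq_false
    intro j
    rw [Nat.testBit_and]
    have := hc j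
    cases ha : a.testBit j <;> cases hb : b.testBit j <;> simp_all
  · rintro ⟨j, ha, hb⟩ h0
    have hj : (a &&& b).testBit j = true := by rw [Nat.testBit_and, ha, hb]; rfl
    rw [h0] at hj
    simp [Nat.zero_testBit] at hj

-- ===== reading B's differ test as signature inequality =====

-- B's per-probe differ expression, named (definitionally the body of pvDiffMask's fold)
def pvDifferB (prei prej : List (List Int × Int)) (projection : String) (m : Int) : Bool :=
  let ri := (prei.filter (fun q => PySem.Int.band q.2 m == q.2)).map Prod.fst
  let rj := (prej.filter (fun q => PySem.Int.band q.2 m == q.2)).map Prod.fst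
  if projection == "answer" then (!ri.isEmpty) != (!rj.isEmpty)
  else if projection == "variable" then
    PySem.List.sorted (PySem.Set.ofList ri.flatten) (fun x => x) false
      != PySem.List.sorted (PySem.Set.ofList rj.flatten) (fun x => x) false
  else if projection == "family" then ri != rj
  else false

theorem pvDiffMask_eq (prei prej : List (List Int × Int)) (probe : List Int) (projection : String) :
    pvDiffMask prei prej probe projection
      = ((natDm (probe.zipIdx 0) (pvDifferB prei prej projection) 0 : Nat) : Int) := by
  have h0 : pvDiffMask prei prej probe projection
      = (PySem.List.enumerate probe (((0 : Nat) : Int))).foldl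
          (fun dm km => if pvDifferB prei prej projection km.2 then
            PySem.Int.bor dm ((1 : Int) <<< km.1.toNat) else dm) (((0 : Nat) : Int)) := rfl
  rw [h0, enumFold_cast]

-- filtering a pre-masked family recovers A's restriction
theorem preFilter_eq (f : List (List Int)) (m : Int) :
    (((f.map (fun e => (e, pvMask e))).filter (fun q => PySem.Int.band q.2 m == q.2)).map Prod.fst)
      = f.filter (fun e => PySem.Int.band (pvMask e) m == pvMask e) := by
  rw [List.filter_map, List.map_map]
  have hid : (Prod.fst ∘ fun e : List Int => (e, pvMask e)) = id := rfl
  rw [hid, List.map_id]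
  rfl

-- the empty-restriction special case of A's "variable" branch is vacuous
theorem sorted_if_empty (r : List (List Int)) :
    (if r.isEmpty then ([] : List Int)
      else PySem.List.sorted (PySem.Set.ofList r.flatten) (fun x => x) false)
      = PySem.List.sorted (PySem.Set.ofList r.flatten) (fun x => x) false := by
  cases r with
  | nil => rfl
  | cons a t => rfl

theorem pvDifferB_eq_sig (f g : List (List Int)) (projection : String) (m : Int) :
    pvDifferB (f.map (fun e => (e, pvMask e))) (g.map (fun e => (e, pvMask e))) projection m
      = decide (pvSig f m projection ≠ pvSig g m projection) := by
  simp only [pvDifferB, pvSig, preFilter_eq, beq_iff_eq]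
  by_cases h1 : projection = "answer"
  · rw [if_pos h1, if_pos h1, if_pos h1, Bool.eq_iff_iff]
    simp [bne_iff_ne]
  · rw [if_neg h1, if_neg h1, if_neg h1]
    by_cases h2 : projection = "variable"
    · rw [if_pos h2, if_pos h2, if_pos h2, sorted_if_empty, sorted_if_empty, Bool.eq_iff_iff]
      simp [bne_iff_ne]
    · rw [if_neg h2, if_neg h2, if_neg h2]
      by_cases h3 : projection = "family"
      · rw [if_pos h3, if_pos h3, if_pos h3, Bool.eq_iff_iff]
        simp [bne_iff_ne]
      · rw [if_neg h3, if_neg h3, if_neg h3]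
        simp

-- the signature grid behind pvColAt
theorem colAt_eq (families : List (List (List Int))) (probe_masks : List Int) (projection : String)
    (k i : Nat) (hk : k < probe_masks.length) (hi : i < families.length) :
    pvColAt (probe_masks.map (fun m => families.map (fun fam => pvSig fam m projection))) k i
      = pvSig families[i] probe_masks[k] projection := by
  unfold pvColAt
  rw [List.getD_eq_getElem (probe_masks.map (fun m => families.map (fun fam => pvSig fam m projection)))
    [] (by simpa using hk)]
  rw [List.getElem_map]
  rw [List.getD_eq_getElem (families.map (fun fam => pvSig fam probe_masks[k] projection))
    PVal.err (by simpa using hi)]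
  rw [List.getElem_map]

-- ===== the two acceptance tests agree on every candidate subset =====

theorem bridge_test (families : List (List (List Int))) (probe_masks : List Int)
    (projection : String) (t : List Nat) :
    (((List.range families.length).flatMap (fun i =>
        (List.range' (i + 1) (families.length - (i + 1))).map (fun j =>
          pvDiffMask ((families.map (fun fam => fam.map (fun e => (e, pvMask e)))).getD i [])
            ((families.map (fun fam => fam.map (fun e => (e, pvMask e)))).getD j [])
            probe_masks projection))).all
      (fun dm => PySem.Int.band dm
        ((t.map (fun k : Nat => (k : Int))).foldl
          (fun c k => PySem.Int.bor c ((1 : Int) <<< k.toNat)) 0) != 0))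
    = ((PySem.Set.ofList ((List.range families.length).map
        (fun j => t.map (fun i => pvColAt
          (probe_masks.map (fun m => families.map (fun fam => pvSig fam m projection))) i j)))).length
        == families.length) := by
  rw [Bool.eq_iff_iff, testA_iff]
  have hchosen : ((t.map (fun k : Nat => (k : Int))).foldl
      (fun c k => PySem.Int.bor c ((1 : Int) <<< k.toNat)) 0) = ((natOr t 0 : Nat) : Int) := by
    have := chosen_cast t 0
    simpa using this
  have hcolslen : (probe_masks.map (fun m => families.map (fun fam => pvSig fam m projection))).length
      = probe_masks.length := by simp
  constructor
  · intro hall i j hi hj hij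
    have hmem : (pvDiffMask ((families.map (fun fam => fam.map (fun e => (e, pvMask e)))).getD i [])
        ((families.map (fun fam => fam.map (fun e => (e, pvMask e)))).getD j [])
        probe_masks projection) ∈ (List.range families.length).flatMap (fun i =>
        (List.range' (i + 1) (families.length - (i + 1))).map (fun j =>
          pvDiffMask ((families.map (fun fam => fam.map (fun e => (e, pvMask e)))).getD i [])
            ((families.map (fun fam => fam.map (fun e => (e, pvMask e)))).getD j [])
            probe_masks projection)) := by
      rw [List.mem_flatMap]
      refine ⟨i, List.mem_range.mpr hi, ?_⟩
      rw [List.mem_map]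
      exact ⟨j, List.mem_range'_1.mpr (by omega), rfl⟩
    rw [List.all_eq_true] at hall
    have hdm := hall _ hmem
    rw [bne_iff_ne] at hdm
    rw [List.getD_eq_getElem (families.map (fun fam => fam.map (fun e => (e, pvMask e)))) [] (by simpa using hi),
      List.getD_eq_getElem (families.map (fun fam => fam.map (fun e => (e, pvMask e)))) [] (by simpa using hj)] at hdm
    simp only [List.getElem_map] at hdm
    rw [pvDiffMask_eq, hchosen, PySem.Int.band_natCast] at hdm
    have hne := Int.ofNat_ne_zero.mp hdm
    rw [and_ne_zero_iff] at hne
    obtain ⟨b, hb1, hb2⟩ := hne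
    rw [natDm_testBit] at hb1
    rw [natOr_testBit] at hb2
    simp only [Nat.zero_testBit, Bool.false_or] at hb1 hb2
    rw [zipIdx_any_iff] at hb1
    obtain ⟨hbK, hg⟩ := hb1
    rw [pvDifferB_eq_sig, decide_eq_true_eq] at hg
    refine ⟨b, by simpa [List.contains_iff_mem] using hb2, by rw [hcolslen]; omega, ?_⟩
    rw [colAt_eq families probe_masks projection b i hbK hi,
      colAt_eq families probe_masks projection b j hbK hj]
    exact hg
  · intro hpair
    rw [List.all_eq_true]
    intro dm hdm
    rw [List.mem_flatMap] at hdm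
    obtain ⟨i, hi, hdm⟩ := hdm
    rw [List.mem_map] at hdm
    obtain ⟨j, hj, rfl⟩ := hdm
    rw [List.mem_range] at hi
    rw [List.mem_range'_1] at hj
    obtain ⟨k, hkt, hkK, hkne⟩ := hpair i j hi (by omega) (by omega)
    rw [hcolslen] at hkK
    rw [bne_iff_ne]
    rw [List.getD_eq_getElem (families.map (fun fam => fam.map (fun e => (e, pvMask e)))) [] (by simpa using hi),
      List.getD_eq_getElem (families.map (fun fam => fam.map (fun e => (e, pvMask e)))) [] (by simp; omega)]
    simp only [List.getElem_map]
    rw [pvDiffMask_eq, hchosen, PySem.Int.band_natCast]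
    refine Int.ofNat_ne_zero.mpr ((and_ne_zero_iff _ _).mpr ⟨k, ?_, ?_⟩)
    · rw [natDm_testBit]
      simp only [Nat.zero_testBit, Bool.false_or]
      rw [zipIdx_any_iff]
      refine ⟨hkK, ?_⟩
      rw [pvDifferB_eq_sig, decide_eq_true_eq]
      rw [colAt_eq families probe_masks projection k i hkK hi,
        colAt_eq families probe_masks projection k j hkK (by omega)] at hkne
      exact hkne
    · rw [natOr_testBit]
      simp [hkt]

-- ===== the two searches agree =====

theorem scan_eq (columns : List (List PVal)) (n : Nat) (diffs : List Int)
    (htest : ∀ s : List Nat,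
      (diffs.all (fun dm => PySem.Int.band dm
        ((s.map (fun k : Nat => (k : Int))).foldl
          (fun c k => PySem.Int.bor c ((1 : Int) <<< k.toNat)) 0) != 0))
      = ((PySem.Set.ofList ((List.range n).map (fun j => s.map (fun i => pvColAt columns i j)))).length == n)) :
    ∀ cands : List (List Nat), (∀ s ∈ cands, s ≠ []) →
      pvHitB diffs (cands.map (List.map (fun k : Nat => (k : Int))))
        = (pvScanA columns n cands).map (List.map (fun k : Nat => (k : Int))) := by
  intro cands
  induction cands with
  | nil => intro _; rfl
  | cons s rest ih =>
    intro hne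
    have hs : s ≠ [] := hne s (by simp)
    simp only [List.map_cons, pvHitB, pvScanA]
    have hsE : ¬(s.isEmpty = true) := by simpa [List.isEmpty_iff] using hs
    rw [if_neg hsE]
    rw [htest s]
    by_cases ht : ((PySem.Set.ofList ((List.range n).map (fun j => s.map (fun i => pvColAt columns i j)))).length == n) = true
    · rw [if_pos ht, if_pos ht]; rfl
    · rw [if_neg ht, if_neg ht]
      exact ih (fun x hx => hne x (by simp [hx]))

theorem pyRange_zero_cast (K : Nat) :
    PySem.List.pyRange 0 ((K : Nat) : Int) 1 = (List.range K).map (fun k : Nat => (k : Int)) := by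
  rw [PySem.List.pyRange_one]
  simp

theorem sizes_eq (columns : List (List PVal)) (n K : Nat) (diffs : List Int)
    (htest : ∀ s : List Nat,
      (diffs.all (fun dm => PySem.Int.band dm
        ((s.map (fun k : Nat => (k : Int))).foldl
          (fun c k => PySem.Int.bor c ((1 : Int) <<< k.toNat)) 0) != 0))
      = ((PySem.Set.ofList ((List.range n).map (fun j => s.map (fun i => pvColAt columns i j)))).length == n)) :
    ∀ sizes : List Nat, (∀ z ∈ sizes, 0 < z) →
      pvSizesB diffs ((K : Nat) : Int) (sizes.map (fun z : Nat => (z : Int)))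
        = (pvFindA columns n (List.range K) sizes).map (List.map (fun k : Nat => (k : Int))) := by
  intro sizes
  induction sizes with
  | nil => intro _; rfl
  | cons z rest ih =>
    intro hpos
    simp only [List.map_cons, pvSizesB, pvFindA]
    have hcand : pvCombosB ((z : Nat) : Int).toNat 0 ((K : Nat) : Int)
        = (pvCombos z (List.range K)).map (List.map (fun k : Nat => (k : Int))) := by
      rw [Int.toNat_natCast, pvCombosB_eq, pyRange_zero_cast, pvCombos_map]
    rw [hcand]
    rw [scan_eq columns n diffs htest (pvCombos z (List.range K))
      (fun s hsmem => by
        have hlen := pvCombos_length_mem z (List.range K) s hsmem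
        have hz := hpos z (by simp)
        intro hnil
        rw [hnil] at hlen
        simp at hlen
        omega)]
    cases hscan : pvScanA columns n (pvCombos z (List.range K)) with
    | some s => rfl
    | none =>
      show pvSizesB diffs ((K : Nat) : Int) (rest.map (fun z : Nat => (z : Int))) = _
      exact ih (fun x hx => hpos x (by simp [hx]))

theorem findA_head0 (columns : List (List PVal)) (n : Nat) (idxs : List Nat) (rest : List Nat) :
    pvFindA columns n idxs (0 :: rest) = pvFindA columns n idxs rest := by
  simp [pvFindA, pvCombos, pvScanA]

theorem pyRange_one_succ_cast (K : Nat) :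
    PySem.List.pyRange 1 (((K : Nat) : Int) + 1) 1
      = ((List.range K).map Nat.succ).map (fun z : Nat => (z : Int)) := by
  rw [PySem.List.pyRange_one]
  simp only [List.map_map]
  have hK : (((K : Nat) : Int) + 1 - 1).toNat = K := by omega
  rw [hK]
  apply List.map_congr_left
  intro k _
  simp [Nat.succ_eq_add_one]
  ring

-- the two ports agree on every input
set_option maxHeartbeats 4000000 in
theorem ports_eq (families : List (List (List Int))) (projection : String) (p : Int) :
    exhaustive_exact_basis_small families projection p
      = exhaustive_exact_basis_small_alt families projection p := by
  unfold exhaustive_exact_basis_small exhaustive_exact_basis_small_alt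
  simp only [pvCombosB_eq, pvMasks]
  by_cases hle : families.length ≤ 1
  · simp only [if_pos hle]
  · simp only [if_neg hle]
    generalize (PySem.List.pyRange 0 (p + 1) 1).flatMap
      (fun size => (pvCombos size.toNat (PySem.List.pyRange 1 (p + 1) 1)).map pvMask) = probe_masks
    rw [pyRange_one_succ_cast probe_masks.length]
    have hpos : ∀ z ∈ (List.range probe_masks.length).map Nat.succ, 0 < z := by
      intro z hz
      rw [List.mem_map] at hz
      obtain ⟨w, _, rfl⟩ := hz
      exact Nat.succ_pos w
    have htest := fun s => bridge_test families probe_masks projection s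
    have hsz := sizes_eq _ families.length probe_masks.length _ htest
      ((List.range probe_masks.length).map Nat.succ) hpos
    rw [hsz]
    rw [show List.range (probe_masks.length + 1) = 0 :: (List.range probe_masks.length).map Nat.succ
      from List.range_succ_eq_map]
    rw [findA_head0]
    cases hres : pvFindA (probe_masks.map (fun m => families.map (fun fam => pvSig fam m projection)))
        families.length (List.range probe_masks.length)
        ((List.range probe_masks.length).map Nat.succ) with
    | none => rfl
    | some s =>
      show ((s.length : Int), s.map (fun i => probe_masks.getD i 0))
        = (((s.map (fun k : Nat => (k : Int))).length : Int),
            (s.map (fun k : Nat => (k : Int))).map (fun k => probe_masks.getD k.toNat 0))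
      refine congrArg₂ Prod.mk ?_ ?_
      · simp
      · rw [List.map_map]
        apply List.map_congr_left
        intro k _
        simp

-- ===== VERDICT (by name: the statement is the Claim_ definition above) =====
theorem exhaustive_exact_basis_small_spec : Claim_equal_exhaustive_exact_basis_small := by
  intro families projection p _ _
  unfold Spec_exhaustive_exact_basis_small
  exact ports_eq families projection p
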